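-- pv_equiv track=rewrite | github.com/ZeroToMax-ZYZ/transformer-pytorch-main | data/copy_task.py | _normalize_alphabet
-- ===== SOURCE A (Python) =====
-- from typing import Iterator, List, Optional, Sequence, Tuple
--
-- def _normalize_alphabet(alphabet: Sequence[str] | str) -> List[str]:
--     if isinstance(alphabet, str):
--         tokens = list(alphabet)
--     else:
--         tokens = list(alphabet)
--
--     normalized: List[str] = []
--     seen = set()
--     for token in tokens:
--         if not token:
--             raise ValueError("alphabet tokens must be non-empty.")
--         if any(char.isspace() for char in token):
--             raise ValueError("alphabet tokens must not contain whitespace.")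
--         if token in seen:
--             continue
--         seen.add(token)
--         normalized.append(token)
--
--     if not normalized:
--         raise ValueError("alphabet must contain at least one token.")
--
--     return normalized
-- ===== SOURCE B (Python) =====
-- from typing import List, Sequence
--
--
-- def _normalize_alphabet(alphabet: "Sequence[str] | str") -> List[str]:
--     # Head-and-filter dedup: repeatedly validate the current head token, keep it,
--     # and drop every later copy of it from the remaining tokens (no seen-set).
--     tokens = list(alphabet)
--     normalized: List[str] = []
--     while tokens:
--         head = tokens[0]
--         if not head:
--             raise ValueError("alphabet tokens must be non-empty.")
--         if any(char.isspace() for char in head):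
--             raise ValueError("alphabet tokens must not contain whitespace.")
--         normalized.append(head)
--         tokens = [t for t in tokens[1:] if t != head]
--
--     if not normalized:
--         raise ValueError("alphabet must contain at least one token.")
--     return normalized
-- ===== Notes on version B (the rewrite author's own statement) =====
-- stated objective: alternative
-- what changed: Replaces A's single iterative loop with a seen-set accumulator by a head-and-filter dedup: validate the current head token, keep it, and continue on the remaining tokens with every later copy of the head filtered out — no seen set; it trades A's linear time for O(n*d) refiltering (d = distinct tokens), so it is slower on large distinct-heavy inputs.
import Mathlib
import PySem

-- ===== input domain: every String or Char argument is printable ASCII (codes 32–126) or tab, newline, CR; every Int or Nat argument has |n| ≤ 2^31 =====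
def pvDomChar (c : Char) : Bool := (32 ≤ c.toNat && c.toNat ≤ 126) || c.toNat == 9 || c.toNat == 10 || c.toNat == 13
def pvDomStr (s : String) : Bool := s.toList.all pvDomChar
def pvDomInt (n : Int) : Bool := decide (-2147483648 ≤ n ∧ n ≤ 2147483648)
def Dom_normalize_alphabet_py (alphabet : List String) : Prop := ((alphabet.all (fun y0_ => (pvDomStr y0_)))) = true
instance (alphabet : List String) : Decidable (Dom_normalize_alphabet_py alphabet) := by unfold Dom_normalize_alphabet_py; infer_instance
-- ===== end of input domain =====

-- B replaces A's seen-set loop by a head-and-filter dedup (validate the head, keep it, continue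
-- on the tail with later copies of the head filtered out) — objective: alternative algorithm.

-- ===== PORT A =====
-- A's loop: validate each token, skip duplicates via a seen set, append to normalized.
-- 'none' models a raised ValueError; Pre_ excludes exactly those inputs.
def pvLoopA : List String → PySem.Set String → List String → Option (List String)
  | [], _, normalized => some normalized
  | t :: ts, seen, normalized =>
    if t = "" then none
    else if t.toList.any PySem.Chars.isspace then none
    else if PySem.Set.contains seen t then pvLoopA ts seen normalized
    else pvLoopA ts (PySem.Set.add seen t) (normalized ++ [t])

def normalize_alphabet_py (alphabet : List String) : List String :=
  match pvLoopA alphabet PySem.Set.empty [] with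
  | none => []                                  -- a ValueError was raised (outside Pre_)
  | some normalized =>
      if normalized = [] then [] else normalized  -- empty ⇒ ValueError (outside Pre_)

-- ===== PORT B =====
-- B's while loop as structural recursion on the shrinking token list: validate the head,
-- keep it, continue on the tail with later copies of the head filtered out; 'none' = ValueError.
def pvGoB : List String → Option (List String)
  | [] => some []
  | h :: rest =>
    if h = "" then none
    else if h.toList.any PySem.Chars.isspace then none
    else
      match pvGoB (rest.filter (fun t => t ≠ h)) with
      | none => none
      | some l => some (h :: l)
termination_by ts => ts.length
decreasing_by
  simp only [List.length_unattach, List.length_cons]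
  exact Nat.lt_succ_of_le (le_trans (List.length_filter_le _ _) (by simp))

def normalize_alphabet_py_alt (alphabet : List String) : List String :=
  match pvGoB alphabet with
  | none => []                                  -- a ValueError was raised (outside Pre_)
  | some normalized =>
      if normalized = [] then [] else normalized  -- empty ⇒ ValueError (outside Pre_)

-- ===== PRECONDITION & SPEC =====
-- Pre_ excludes exactly the inputs where A raises ValueError: an empty token list,
-- an empty token, or a token containing a whitespace character.
def Pre_normalize_alphabet_py (alphabet : List String) : Prop :=
  alphabet ≠ [] ∧ ∀ t ∈ alphabet, t ≠ "" ∧ t.toList.any PySem.Chars.isspace = false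
instance (alphabet : List String) : Decidable (Pre_normalize_alphabet_py alphabet) := by
  unfold Pre_normalize_alphabet_py; infer_instance

def pvWitness_normalize_alphabet_py : List String := ["a", "b", "a", "cd"]

def Spec_normalize_alphabet_py (alphabet : List String) (out : List String) : Prop := out = normalize_alphabet_py_alt alphabet
instance (alphabet : List String) (out : List String) : Decidable (Spec_normalize_alphabet_py alphabet out) := by unfold Spec_normalize_alphabet_py; infer_instance

-- ===== CLAIM (what is proved, stated in full; the proofs are below) =====
def Claim_equal_normalize_alphabet_py : Prop := ∀ (alphabet : List String), Dom_normalize_alphabet_py alphabet → Pre_normalize_alphabet_py alphabet → Spec_normalize_alphabet_py alphabet (normalize_alphabet_py alphabet)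

-- ===== LEMMAS AND PROOFS =====

-- The pure value of B's recursion on valid tokens: head-and-filter dedup.
def pvDedupB : List String → List String
  | [] => []
  | h :: rest => h :: pvDedupB (rest.filter (fun t => t ≠ h))
termination_by ts => ts.length
decreasing_by
  simp only [List.length_unattach, List.length_cons]
  exact Nat.lt_succ_of_le (le_trans (List.length_filter_le _ _) (by simp))

-- On valid tokens B's recursion never raises and computes pvDedupB.
theorem pvGoB_valid (n : Nat) : ∀ ts : List String, ts.length ≤ n →
    (∀ t ∈ ts, t ≠ "" ∧ t.toList.any PySem.Chars.isspace = false) →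
    pvGoB ts = some (pvDedupB ts) := by
  induction n with
  | zero =>
    intro ts hlen _
    have : ts = [] := List.length_eq_zero_iff.mp (Nat.le_zero.mp hlen)
    subst this; simp [pvGoB, pvDedupB]
  | succ n ih =>
    intro ts hlen h
    cases ts with
    | nil => simp [pvGoB, pvDedupB]
    | cons hd rest =>
      obtain ⟨h1, h2⟩ := h hd (by simp)
      have hrest : ∀ t ∈ rest.filter (fun t => t ≠ hd),
          t ≠ "" ∧ t.toList.any PySem.Chars.isspace = false :=
        fun t ht => h t (List.mem_cons_of_mem _ (List.mem_of_mem_filter ht))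
      have hlen' : (rest.filter (fun t => t ≠ hd)).length ≤ n := by
        have := List.length_filter_le (fun t => decide (t ≠ hd)) rest
        simp only [List.length_cons] at hlen; omega
      have hih := ih (rest.filter (fun t => t ≠ hd)) hlen' hrest
      rw [pvGoB, pvDedupB]
      simp only [ne_eq, decide_not] at hih ⊢
      simp [h1, h2, hih]

-- On valid tokens A's loop never raises and its result is acc ++ the head-and-filter
-- dedup of the tokens not already seen.
theorem pvLoopA_valid (ts : List String) :
    ∀ (seen : PySem.Set String) (acc : List String),
      (∀ t ∈ ts, t ≠ "" ∧ t.toList.any PySem.Chars.isspace = false) →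
      pvLoopA ts seen acc =
        some (acc ++ pvDedupB (ts.filter (fun t => !PySem.Set.contains seen t))) := by
  induction ts with
  | nil => intro seen acc _; simp [pvLoopA, pvDedupB]
  | cons t ts ih =>
    intro seen acc h
    obtain ⟨ht1, ht2⟩ := h t (by simp)
    have hts : ∀ x ∈ ts, x ≠ "" ∧ x.toList.any PySem.Chars.isspace = false :=
      fun x hx => h x (by simp [hx])
    by_cases hmem : t ∈ seen
    · -- duplicate: skipped by A, dropped by the filter
      have hstep : pvLoopA (t :: ts) seen acc = pvLoopA ts seen acc := by
        simp [pvLoopA, ht1, ht2, hmem]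
      have hfc : (t :: ts).filter (fun x => !PySem.Set.contains seen x)
          = ts.filter (fun x => !PySem.Set.contains seen x) := by simp [hmem]
      rw [hstep, hfc]; exact ih seen acc hts
    · have hstep : pvLoopA (t :: ts) seen acc
          = pvLoopA ts (PySem.Set.add seen t) (acc ++ [t]) := by
        simp [pvLoopA, ht1, ht2, hmem]
      have hfc : (t :: ts).filter (fun x => !PySem.Set.contains seen x)
          = t :: ts.filter (fun x => !PySem.Set.contains seen x) := by simp [hmem]
      rw [hstep, ih (PySem.Set.add seen t) (acc ++ [t]) hts, hfc, pvDedupB]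
      congr 1
      rw [List.append_assoc, List.singleton_append]
      congr 2
      rw [List.filter_filter]
      apply congrArg
      apply List.filter_congr
      intro x hx
      by_cases hxt : x = t
      · subst hxt
        simp [PySem.Set.add_of_not_mem hmem]
      · simp [PySem.Set.add_of_not_mem hmem, hxt]

-- ===== VERDICT (by name: the statement is the Claim_ definition above) =====
theorem normalize_alphabet_py_spec : Claim_equal_normalize_alphabet_py := by
  intro alphabet _ hpre
  obtain ⟨hne, hall⟩ := hpre
  unfold Spec_normalize_alphabet_py normalize_alphabet_py normalize_alphabet_py_alt
  rw [pvLoopA_valid alphabet PySem.Set.empty [] hall, pvGoB_valid alphabet.length alphabet le_rfl hall]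
  have hfilter : alphabet.filter (fun t => !PySem.Set.contains PySem.Set.empty t) = alphabet := by
    apply List.filter_eq_self.mpr
    intro x hx
    simp [PySem.Set.empty]
  rw [hfilter, List.nil_append]
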